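-- pv_equiv track=rewrite | github.com/snarfed/bridgy-fed | atproto_util.py | s32encode
-- ===== SOURCE A (Python) =====
-- from numbers import Integral
--
-- S32_CHARS = '234567abcdefghijklmnopqrstuvwxyz'
--
-- def s32encode(num):
--     """Base32 encode with encoding variant sort.
--
--     Based on https://github.com/bluesky-social/atproto/blob/main/packages/common-web/src/tid.ts
--
--     Args:
--       num: int or Integral
--
--     Returns:
--       str
--     """
--     assert isinstance(num, Integral)
--
--     encoded = []
--     while num > 0:
--         c = num % 32
--         num = num // 32
--         encoded.insert(0, S32_CHARS[c])
--
--     return ''.join(encoded)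
-- ===== SOURCE B (Python) =====
-- from numbers import Integral
--
-- S32_CHARS = '234567abcdefghijklmnopqrstuvwxyz'
--
-- def s32encode(num):
--     """Recursive base-conversion: high-order digits come from the recursive call."""
--     assert isinstance(num, Integral)
--     if num <= 0:
--         return ''
--     return s32encode(num // 32) + S32_CHARS[num % 32]
-- ===== Notes on version B (the rewrite author's own statement) =====
-- stated objective: simpler
-- what changed: Replaced the while-loop that prepends digits into a list via insert(0,...) and joins at the end with a direct recursive base conversion that returns s32encode(num//32) + S32_CHARS[num%32].
import Mathlib
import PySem

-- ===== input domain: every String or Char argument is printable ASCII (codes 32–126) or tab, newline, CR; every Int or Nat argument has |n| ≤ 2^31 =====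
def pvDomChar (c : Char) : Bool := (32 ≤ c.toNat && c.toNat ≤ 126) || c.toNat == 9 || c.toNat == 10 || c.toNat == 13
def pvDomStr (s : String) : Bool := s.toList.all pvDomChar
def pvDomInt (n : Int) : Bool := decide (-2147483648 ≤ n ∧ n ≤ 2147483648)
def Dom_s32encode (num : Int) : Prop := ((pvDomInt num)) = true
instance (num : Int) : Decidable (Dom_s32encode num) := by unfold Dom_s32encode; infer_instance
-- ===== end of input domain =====

-- B replaces A's while-loop with insert(0, ...) by a direct recursive base conversion (simpler decomposition).


-- S32_CHARS as a list of characters (shared constant of the module)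
def pvS32 : List Char := "234567abcdefghijklmnopqrstuvwxyz".toList

-- termination measure for both loops: num // 32 strictly shrinks while num > 0
theorem pvS32_div_lt (num : Int) (h : 0 < num) :
    (PySem.Int.floordiv num 32).toNat < num.toNat := by
  rw [PySem.Int.floordiv_eq_ediv_of_pos (by omega)]
  omega

-- ===== PORT A =====
-- the while loop of A: prepend S32_CHARS[num % 32] (index is always in range, so getD never takes its default)
def s32encodeGo (num : Int) (encoded : List Char) : List Char :=
  if 0 < num then
    s32encodeGo (PySem.Int.floordiv num 32)
      (((PySem.List.pyGet? pvS32 (PySem.Int.mod num 32)).getD ' ') :: encoded)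
  else encoded
termination_by num.toNat
decreasing_by exact pvS32_div_lt num (by omega)

def s32encode (num : Int) : String := String.ofList (s32encodeGo num [])

-- ===== PORT B =====
def s32encode_alt (num : Int) : String :=
  if num ≤ 0 then ""
  else s32encode_alt (PySem.Int.floordiv num 32) ++
    String.ofList [((PySem.List.pyGet? pvS32 (PySem.Int.mod num 32)).getD ' ')]
termination_by num.toNat
decreasing_by exact pvS32_div_lt num (by omega)

-- ===== PRECONDITION & SPEC =====
def Spec_s32encode (num : Int) (out : String) : Prop := out = s32encode_alt num
instance (num : Int) (out : String) : Decidable (Spec_s32encode num out) := by unfold Spec_s32encode; infer_instance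

-- ===== CLAIM (what is proved, stated in full; the proofs are below) =====
def Claim_equal_s32encode : Prop := ∀ (num : Int), Dom_s32encode num → Spec_s32encode num (s32encode num)

-- ===== LEMMAS AND PROOFS =====

theorem s32encodeGo_eq_alt (n : Nat) :
    ∀ (num : Int), num.toNat = n →
      ∀ (acc : List Char), s32encodeGo num acc = (s32encode_alt num).toList ++ acc := by
  induction n using Nat.strong_induction_on with
  | _ n ih =>
    intro num hn acc
    rw [s32encodeGo, s32encode_alt]
    by_cases h : 0 < num
    · have hlt := pvS32_div_lt num h
      rw [if_pos h, if_neg (by omega),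
        ih _ (by omega) (PySem.Int.floordiv num 32) rfl]
      simp
    · rw [if_neg h, if_pos (by omega)]
      rfl

-- ===== VERDICT (by name: the statement is the Claim_ definition above) =====
theorem s32encode_spec : Claim_equal_s32encode := by
  intro num _
  show s32encode num = s32encode_alt num
  rw [s32encode, s32encodeGo_eq_alt num.toNat num rfl []]
  simp [String.ofList_toList]
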